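-- pv_equiv track=rewrite | github.com/ik48655/Introduction-to-programming | Drugi kolokvij, prvi rok 2017/F 1.py | nedjeljivi
-- ===== SOURCE A (Python) =====
-- def nedjeljivi(lst):
--     nedjeljivibr=[]
--     duzina=0
--     while duzina < len(lst):
--         flag = True
--         prvi=duzina
--         for i in range(len(lst)-1):
--             if prvi % lst[i]==0 and lst[i]!=prvi:
--                 flag = False
--         if flag:
--             nedjeljivibr.append(prvi)
--         duzina+=1
--     return nedjeljivibr
-- ===== SOURCE B (Python) =====
-- def nedjeljivi(lst):
--     n = len(lst)
--     marked = [False] * n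
--     for d in set(lst[:-1]):
--         for j in range(0, n, abs(d)):
--             if j != d:
--                 marked[j] = True
--     return [j for j in range(n) if not marked[j]]
-- ===== Notes on version B (the rewrite author's own statement) =====
-- stated objective: faster
-- what changed: A checks every index 0..n-1 against every element of lst[:-1] (nested loops); B deduplicates the divisors into a set and sieves: each distinct divisor marks its multiples once in a boolean array, then the unmarked indices are collected in one pass.
import Mathlib
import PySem

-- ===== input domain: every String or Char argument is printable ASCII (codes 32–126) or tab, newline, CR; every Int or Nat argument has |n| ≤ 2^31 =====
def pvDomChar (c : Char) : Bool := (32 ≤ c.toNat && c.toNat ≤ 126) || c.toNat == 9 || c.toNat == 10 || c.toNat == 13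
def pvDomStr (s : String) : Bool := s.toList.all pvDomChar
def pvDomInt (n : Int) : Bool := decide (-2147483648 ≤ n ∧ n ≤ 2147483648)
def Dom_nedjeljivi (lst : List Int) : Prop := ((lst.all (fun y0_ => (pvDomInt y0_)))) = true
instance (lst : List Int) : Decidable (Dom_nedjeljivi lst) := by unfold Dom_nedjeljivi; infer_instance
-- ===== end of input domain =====

-- B replaces A's per-index scan over all divisors (quadratic) by a sieve: each
-- distinct divisor value marks its multiples in a boolean array once.

-- ===== PORT A =====
-- inner 'for i in range(len(lst)-1)' loop computing the flag
def nedjAFlag (lst : List Int) (prvi : Int) : Bool :=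
  (PySem.List.pyRange 0 ((lst.length : Int) - 1) 1).foldl
    (fun flag i =>
      if PySem.Int.mod prvi (PySem.List.pyGetD lst i 0) = 0 ∧ PySem.List.pyGetD lst i 0 ≠ prvi
      then false else flag) true

-- the 'while duzina < len(lst)' loop (fuel = number of remaining iterations)
def nedjALoop (lst : List Int) : Nat → Int → List Int → List Int
  | 0, _, acc => acc
  | fuel+1, duzina, acc =>
    if duzina < (lst.length : Int) then
      nedjALoop lst fuel (duzina + 1)
        (if nedjAFlag lst duzina then acc ++ [duzina] else acc)
    else acc

def nedjeljivi (lst : List Int) : List Int := nedjALoop lst lst.length 0 []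

-- ===== PORT B =====
-- 'for j in range(0, n, abs(d)): if j != d: marked[j] = True'
-- (marked[j] = True is m.set j.toNat true: j produced by range(0, n, abs(d)) is a
-- valid non-negative index, so this is exact)
def nedjBMark (n : Nat) (d : Int) (m : List Bool) : List Bool :=
  (PySem.List.pyRange 0 (n : Int) (d.natAbs : Int)).foldl
    (fun m j => if j ≠ d then m.set j.toNat true else m) m

def nedjeljivi_alt (lst : List Int) : List Int :=
  let n := lst.length
  let marked := (PySem.Set.ofList (PySem.List.slice lst none (some (-1)))).foldl
    (fun m d => nedjBMark n d m) (List.replicate n false)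
  (PySem.List.pyRange 0 (n : Int) 1).filter
    (fun j => !(PySem.List.pyGetD marked j false))

-- ===== PRECONDITION & SPEC =====
-- Pre_ excludes exactly the inputs where A raises ZeroDivisionError (a 0 among
-- lst[:-1]); B raises ValueError there too (range step 0).
def Pre_nedjeljivi (lst : List Int) : Prop := (0 : Int) ∉ lst.dropLast
instance (lst : List Int) : Decidable (Pre_nedjeljivi lst) := by unfold Pre_nedjeljivi; infer_instance
def pvWitness_nedjeljivi : List Int := [2, 3, 7]

def Spec_nedjeljivi (lst : List Int) (out : List Int) : Prop := out = nedjeljivi_alt lst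
instance (lst : List Int) (out : List Int) : Decidable (Spec_nedjeljivi lst out) := by unfold Spec_nedjeljivi; infer_instance

-- ===== CLAIM (what is proved, stated in full; the proofs are below) =====
def Claim_equal_nedjeljivi : Prop := ∀ (lst : List Int), Dom_nedjeljivi lst → Pre_nedjeljivi lst → Spec_nedjeljivi lst (nedjeljivi lst)

-- ===== LEMMAS AND PROOFS =====

-- a "set flags to false on hits" fold is the negated 'any'
theorem foldl_false_if_eq_not_any (ds : List Int) (p : Int → Prop) [DecidablePred p] (b : Bool) :
    ds.foldl (fun flag d => if p d then false else flag) b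
      = (b && !(ds.any (fun d => decide (p d)))) := by
  induction ds generalizing b with
  | nil => simp
  | cons d ds ih =>
    simp only [List.foldl_cons, List.any_cons, ih]
    by_cases h : p d <;> simp [h]

-- A's inner loop decides "some element of lst[:-1] divides prvi and differs from it"
theorem nedjAFlag_eq (lst : List Int) (prvi : Int) :
    nedjAFlag lst prvi
      = !(lst.dropLast.any (fun d => decide (PySem.Int.mod prvi d = 0 ∧ d ≠ prvi))) := by
  unfold nedjAFlag
  rcases List.eq_nil_or_concat lst with rfl | ⟨ys, y, rfl⟩
  · simp [PySem.List.pyRange_one_eq_nil]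
  · simp only [List.concat_eq_append]
    have hlen : ((ys ++ [y]).length : Int) - 1 = ((ys ++ [y]).dropLast.length : Int) := by
      simp
    rw [hlen]
    rw [PySem.List.foldl_congr_mem _ _
      (fun flag i =>
        if PySem.Int.mod prvi (PySem.List.pyGetD (ys ++ [y]).dropLast i 0) = 0 ∧
           PySem.List.pyGetD (ys ++ [y]).dropLast i 0 ≠ prvi then false else flag) _
      (fun acc x hx => by
        rcases PySem.List.mem_pyRange_one.mp hx with ⟨h0, h1⟩
        simp only [PySem.List.pyGetD_eq_getElem _ _ h0
            (show x < (((ys ++ [y]).length : Nat) : Int) by simp at h1 ⊢; omega),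
          PySem.List.pyGetD_eq_getElem _ _ h0
            (show x < (((ys ++ [y]).dropLast.length : Nat) : Int) from h1),
          List.getElem_dropLast])]
    rw [PySem.List.foldl_pyRange_zero_pyGetD' (ys ++ [y]).dropLast 0
      (fun flag v => if PySem.Int.mod prvi v = 0 ∧ v ≠ prvi then false else flag) true]
    rw [foldl_false_if_eq_not_any]
    simp

-- A's while loop appends the surviving indices of [duzina, n) to acc
theorem nedjALoop_eq (lst : List Int) (fuel : Nat) (duzina : Int) (acc : List Int)
    (h : duzina + fuel = (lst.length : Int)) :
    nedjALoop lst fuel duzina acc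
      = acc ++ (PySem.List.pyRange duzina (lst.length : Int) 1).filter (fun j => nedjAFlag lst j) := by
  induction fuel generalizing duzina acc with
  | zero =>
    rw [PySem.List.pyRange_one_eq_nil (by omega)]
    simp [nedjALoop]
  | succ fuel ih =>
    have hlt : duzina < (lst.length : Int) := by omega
    rw [nedjALoop, if_pos hlt, ih _ _ (by omega)]
    rw [PySem.List.pyRange_one_cons hlt]
    by_cases hf : nedjAFlag lst duzina
    · simp [hf]
    · simp [hf]

-- setting one in-range index of a boolean array, read back
theorem set_getD (m : List Bool) (k j : Nat) (hk : k < m.length) :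
    (m.set k true).getD j false = (decide (k = j) || m.getD j false) := by
  by_cases h : k = j
  · subst h; simp [List.getD_eq_getElem?_getD, hk]
  · simp [List.getD_eq_getElem?_getD, h]

-- generic sieve step: folding 'set x.toNat true when p x' over in-range indices
theorem foldl_set_getD (L : List Int) (m : List Bool) (j : Nat) (p : Int → Prop) [DecidablePred p]
    (hL : ∀ x ∈ L, 0 ≤ x ∧ x < (m.length : Int)) (hj : j < m.length) :
    (L.foldl (fun acc x => if p x then acc.set x.toNat true else acc) m).getD j false
      = (m.getD j false || L.any (fun x => decide (p x) && x == (j : Int))) := by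
  induction L generalizing m with
  | nil => simp
  | cons x L ih =>
    obtain ⟨hx0, hxlt⟩ := hL x (List.mem_cons_self)
    have hxm : x.toNat < m.length := by omega
    simp only [List.foldl_cons, List.any_cons]
    by_cases hp : p x
    · rw [if_pos hp]
      rw [ih (m.set x.toNat true)
        (fun y hy => by simpa using hL y (List.mem_cons_of_mem _ hy)) (by simpa using hj)]
      rw [set_getD m x.toNat j hxm]
      have hbe : (x == (j : Int)) = decide (x.toNat = j) := by
        by_cases h : x.toNat = j
        · simp [show x = (j : Int) by omega]
        · simp [show x ≠ (j : Int) by omega, h]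
      simp only [hp, decide_true, Bool.true_and, hbe]
      cases m.getD j false <;> cases L.any (fun x => decide (p x) && x == (j : Int)) <;>
        cases decide (x.toNat = j) <;> simp
    · rw [if_neg hp]
      rw [ih m (fun y hy => hL y (List.mem_cons_of_mem _ hy)) hj]
      simp [hp]

theorem length_foldl_set (L : List Int) (m : List Bool) (p : Int → Prop) [DecidablePred p] :
    (L.foldl (fun acc x => if p x then acc.set x.toNat true else acc) m).length = m.length := by
  induction L generalizing m with
  | nil => rfl
  | cons x L ih => simp only [List.foldl_cons]; rw [ih]; by_cases h : p x <;> simp [h]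

theorem length_nedjBMark (n : Nat) (d : Int) (m : List Bool) :
    (nedjBMark n d m).length = m.length := by
  unfold nedjBMark
  exact length_foldl_set _ _ _

-- one divisor's sieve pass, read back at index j
theorem nedjBMark_getD (n : Nat) (d : Int) (m : List Bool) (j : Nat)
    (hd : d ≠ 0) (hm : m.length = n) (hj : j < n) :
    (nedjBMark n d m).getD j false
      = (m.getD j false || (decide (d ∣ (j : Int)) && decide ((j : Int) ≠ d))) := by
  have hs : (0 : Int) < (d.natAbs : Int) := by
    have := Int.natAbs_pos.mpr hd; exact_mod_cast this
  unfold nedjBMark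
  rw [foldl_set_getD _ _ _ _
    (fun x hx => by
      rcases (PySem.List.mem_pyRange_iff_of_pos hs x).mp hx with ⟨h1, h2, _⟩
      exact ⟨h1, by omega⟩)
    (by omega)]
  congr 1
  rw [Bool.eq_iff_iff]
  simp only [List.any_eq_true, Bool.and_eq_true, decide_eq_true_eq, beq_iff_eq,
    PySem.List.mem_pyRange_iff_of_pos hs]
  constructor
  · rintro ⟨x, ⟨_, _, hdvd⟩, hne, rfl⟩
    exact ⟨(Int.natAbs_dvd).mp (by simpa using hdvd), hne⟩
  · rintro ⟨hdvd, hne⟩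
    exact ⟨(j : Int), ⟨by omega, by omega, by simpa using (Int.natAbs_dvd).mpr hdvd⟩, hne, rfl⟩

theorem length_marked (S : List Int) (n : Nat) (m : List Bool) :
    (S.foldl (fun m d => nedjBMark n d m) m).length = m.length := by
  induction S generalizing m with
  | nil => rfl
  | cons d S ih => simp only [List.foldl_cons]; rw [ih, length_nedjBMark]

-- the whole sieve, read back at index j
theorem marked_getD (S : List Int) (n : Nat) (m : List Bool) (j : Nat)
    (hS : ∀ d ∈ S, d ≠ 0) (hm : m.length = n) (hj : j < n) :
    ((S.foldl (fun m d => nedjBMark n d m) m).getD j false)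
      = (m.getD j false || S.any (fun d => decide (d ∣ (j : Int)) && decide ((j : Int) ≠ d))) := by
  induction S generalizing m with
  | nil => simp
  | cons d S ih =>
    simp only [List.foldl_cons, List.any_cons]
    rw [ih _ (fun x hx => hS x (List.mem_cons_of_mem _ hx)),
      nedjBMark_getD n d m j (hS d (List.mem_cons_self)) hm hj, Bool.or_assoc]
    rw [length_nedjBMark]; exact hm

-- ===== VERDICT (by name: the statement is the Claim_ definition above) =====
theorem nedjeljivi_spec : Claim_equal_nedjeljivi := by
  intro lst _ hpre
  show nedjeljivi lst = nedjeljivi_alt lst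
  unfold nedjeljivi nedjeljivi_alt
  rw [nedjALoop_eq lst lst.length 0 [] (by omega)]
  simp only [List.nil_append, PySem.List.slice_to_neg_one]
  apply List.filter_congr
  intro j hj
  rcases PySem.List.mem_pyRange_one.mp hj with ⟨h0, h1⟩
  have hjn : j.toNat < lst.length := by omega
  have hS : ∀ d ∈ PySem.Set.ofList lst.dropLast, d ≠ 0 := by
    intro d hd
    have hmem := (PySem.Set.mem_ofList _ _).mp hd
    intro h; exact hpre (h ▸ hmem)
  have hlen : ((PySem.Set.ofList lst.dropLast).foldl
      (fun m d => nedjBMark lst.length d m) (List.replicate lst.length false)).length = lst.length := by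
    rw [length_marked]; simp
  rw [PySem.List.pyGetD_eq_getElem _ _ h0 (by omega : j < ((((PySem.Set.ofList lst.dropLast).foldl
      (fun m d => nedjBMark lst.length d m) (List.replicate lst.length false)).length : Nat) : Int))]
  rw [← List.getD_eq_getElem _ false (by omega)]
  rw [marked_getD _ _ _ _ hS (by simp) hjn]
  have hrep : (List.replicate lst.length false).getD j.toNat false = false := by
    simp only [List.getD_eq_getElem?_getD, List.getElem?_replicate]
    split <;> rfl
  rw [nedjAFlag_eq]
  have hcast : ((j.toNat : Nat) : Int) = j := by omega
  simp only [hrep, Bool.false_or, hcast]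
  congr 1
  rw [Bool.eq_iff_iff]
  simp only [List.any_eq_true, Bool.and_eq_true, decide_eq_true_eq,
    PySem.Int.mod_eq_zero_iff_dvd]
  constructor
  · rintro ⟨d, hd, hdvd, hne⟩
    exact ⟨d, (PySem.Set.mem_ofList _ _).mpr hd, hdvd, hne.symm⟩
  · rintro ⟨d, hd, hdvd, hne⟩
    exact ⟨d, (PySem.Set.mem_ofList _ _).mp hd, hdvd, hne.symm⟩
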